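-- pv_equiv track=rewrite | github.com/Laxzal/algorithm_learning | incremenetal_correctness_algorithm.py | incr_correct
-- ===== SOURCE A (Python) =====
-- import math
--
-- def incr_correct(y):
--     if y == 0:
--         return 1
--     else:
--         if y%2 == 1:
--             return 2*incr_correct(math.floor(y/2))
--         else:
--             return (y+1)
-- ===== SOURCE B (Python) =====
-- def incr_correct(y):
--     # Closed form: the odd-halving recursion is exactly binary increment, so the result is y + 1.
--     return y + 1
-- ===== Notes on version B (the rewrite author's own statement) =====
-- stated objective: simpler
-- what changed: Replaced the recursive odd-halving bit-increment with its closed form y + 1.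
-- outside the precondition, e.g. on incr_correct(-1): A raises RecursionError, B returns 0
import Mathlib
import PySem

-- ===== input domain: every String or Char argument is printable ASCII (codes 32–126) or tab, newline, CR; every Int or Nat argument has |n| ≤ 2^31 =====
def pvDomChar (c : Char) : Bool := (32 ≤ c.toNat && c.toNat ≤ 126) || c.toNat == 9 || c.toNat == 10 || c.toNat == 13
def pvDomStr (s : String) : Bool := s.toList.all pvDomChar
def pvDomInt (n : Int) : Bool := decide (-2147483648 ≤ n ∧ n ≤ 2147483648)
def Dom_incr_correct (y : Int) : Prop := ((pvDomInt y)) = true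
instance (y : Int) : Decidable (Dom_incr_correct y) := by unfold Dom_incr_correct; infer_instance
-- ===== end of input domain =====

-- B replaces A's recursive odd-halving bit-increment by its closed form y + 1 (simpler).

-- ===== PORT A =====
-- Fuel-based transliteration of A's recursion; y.natAbs + 2 fuel is enough on every input
-- where the Python returns (excluded y = -1 is the only non-terminating chain).
-- math.floor(y/2) is exact floor division for |y| ≤ 2^31, ported as PySem.Int.floordiv.
def incrA : Nat → Int → Int
  | 0, _ => 0
  | f + 1, y =>
    if y = 0 then 1
    else if PySem.Int.mod y 2 = 1 then 2 * incrA f (PySem.Int.floordiv y 2)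
    else y + 1

def incr_correct (y : Int) : Int := incrA (y.natAbs + 2) y

-- ===== PORT B =====
def incr_correct_alt (y : Int) : Int := y + 1

-- ===== PRECONDITION & SPEC =====
-- A raises RecursionError exactly at y = -1 (floor(-1/2) = -1, infinite recursion); Pre_ excludes it.
def Pre_incr_correct (y : Int) : Prop := y ≠ -1
instance (y : Int) : Decidable (Pre_incr_correct y) := by unfold Pre_incr_correct; infer_instance
def pvWitness_incr_correct : Int := 7

def Spec_incr_correct (y : Int) (out : Int) : Prop := out = incr_correct_alt y
instance (y : Int) (out : Int) : Decidable (Spec_incr_correct y out) := by unfold Spec_incr_correct; infer_instance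

-- ===== CLAIM (what is proved, stated in full; the proofs are below) =====
def Claim_equal_incr_correct : Prop := ∀ (y : Int), Dom_incr_correct y → Pre_incr_correct y → Spec_incr_correct y (incr_correct y)

-- ===== LEMMAS AND PROOFS =====

-- With enough fuel, A's recursion computes y + 1 for every y ≠ -1.
theorem incrA_eq (f : Nat) : ∀ (y : Int), y ≠ -1 → y.natAbs + 2 ≤ f → incrA f y = y + 1 := by
  induction f with
  | zero => intro y _ h; omega
  | succ f ih =>
    intro y hy hf
    simp only [incrA]
    split_ifs with h0 hodd
    · omega
    · rw [PySem.Int.mod_eq_emod_of_pos (by norm_num : (0:Int) < 2)] at hodd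
      rw [PySem.Int.floordiv_eq_ediv_of_pos (by norm_num : (0:Int) < 2)]
      rw [ih (y / 2) (by omega) (by omega)]
      omega
    · rfl

-- ===== VERDICT (by name: the statement is the Claim_ definition above) =====
theorem incr_correct_spec : Claim_equal_incr_correct := by
  intro y _ hy
  unfold Spec_incr_correct incr_correct incr_correct_alt
  exact incrA_eq (y.natAbs + 2) y hy (le_refl _)
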